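-- pv_equiv track=rewrite | github.com/joshobrien-j/How-computers-play-games-3H-project | MCTacToe__NEEDS TIDYING__.py | trin
-- ===== SOURCE A (Python) =====
-- def trin(grid):
-- #    print grid
--     x = 0
--     for i in range(3):
--         for j in range(3):
--             if grid[i][j] == -1:
--                 k = 2
--             elif grid[i][j] == 1:
--                 k = 1
--             else:
--                 k = 0
--             x = x + (k)*(3**(8-3*i-j))
-- #    print grid, x
--     return x
-- ===== SOURCE B (Python) =====
-- def trin(grid):
--     # Map each cell to a base-3 digit character via a lookup table, join the
--     # 9 characters into a string and parse it with int(s, 3).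
--     digitmap = {-1: "2", 1: "1"}
--     digits = "".join(digitmap.get(grid[i][j], "0")
--                      for i in range(3) for j in range(3))
--     return int(digits, 3)
-- ===== Notes on version B (the rewrite author's own statement) =====
-- stated objective: alternative
-- what changed: Instead of summing per-cell values weighted by 3**(8-3*i-j) with an if/elif chain, B maps each cell to a digit character via a lookup dict, joins the 9 characters into a base-3 string and parses it with int(s, 3).
import Mathlib
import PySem

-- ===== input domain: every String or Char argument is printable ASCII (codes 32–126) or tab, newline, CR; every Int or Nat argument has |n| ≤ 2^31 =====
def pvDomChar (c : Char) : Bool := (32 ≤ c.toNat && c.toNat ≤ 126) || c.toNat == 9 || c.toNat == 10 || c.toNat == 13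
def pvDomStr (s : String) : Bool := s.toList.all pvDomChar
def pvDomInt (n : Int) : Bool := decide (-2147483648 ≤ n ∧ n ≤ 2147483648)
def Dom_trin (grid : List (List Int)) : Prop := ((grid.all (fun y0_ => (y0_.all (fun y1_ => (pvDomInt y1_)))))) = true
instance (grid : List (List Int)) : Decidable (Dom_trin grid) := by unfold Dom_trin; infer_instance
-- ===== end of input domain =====

-- B maps each cell to a digit character via a dict, joins them into a base-3 string and parses it with int(s, 3), instead of summing per-cell values weighted by 3**(8-3*i-j) (alternative).

-- ===== PORT A =====
-- A raises IndexError off a 3x3 grid; the port reads cells via pyGet? (none = IndexError),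
-- defaulted only outside Pre_trin. Exponent 8-3*i-j is ≥ 0 for i,j ∈ [0,3); .toNat is exact there.
def trin (grid : List (List Int)) : Int :=
  (PySem.List.pyRange 0 3 1).foldl (fun x i =>
    (PySem.List.pyRange 0 3 1).foldl (fun x j =>
      let v := (PySem.List.pyGet? ((PySem.List.pyGet? grid i).getD []) j).getD 0
      let k : Int := if v = -1 then 2 else if v = 1 then 1 else 0
      x + k * 3 ^ (8 - 3 * i - j).toNat) x) 0

-- ===== PORT B =====
-- int(s, 3) (a library call on a string of '0'/'1'/'2' digits) is ported as the standard
-- base-3 parse over the digit characters; exact on those digits. Cell reads use pyGet?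
-- (none = IndexError), defaulted only outside Pre_trin.
def trin_alt (grid : List (List Int)) : Int :=
  let digitmap : PySem.Dict Int Char :=
    PySem.Dict.insert (PySem.Dict.insert PySem.Dict.empty (-1) '2') 1 '1'
  let digits : List Char :=
    (PySem.List.pyRange 0 3 1).flatMap (fun i =>
      (PySem.List.pyRange 0 3 1).map (fun j =>
        PySem.Dict.getD digitmap
          ((PySem.List.pyGet? ((PySem.List.pyGet? grid i).getD []) j).getD 0) '0'))
  digits.foldl (fun acc c => acc * 3 + ((c.toNat : Int) - 48)) 0

-- ===== PRECONDITION & SPEC =====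
-- Pre_ excludes exactly the inputs where A raises IndexError: fewer than 3 rows, or a short row among the first 3.
def Pre_trin (grid : List (List Int)) : Prop :=
  3 ≤ grid.length ∧ ∀ row ∈ grid.take 3, 3 ≤ row.length
instance (grid : List (List Int)) : Decidable (Pre_trin grid) := by unfold Pre_trin; infer_instance
def pvWitness_trin : List (List Int) := [[1, 0, -1], [0, 1, 0], [-1, -1, 1]]

def Spec_trin (grid : List (List Int)) (out : Int) : Prop := out = trin_alt grid
instance (grid : List (List Int)) (out : Int) : Decidable (Spec_trin grid out) := by unfold Spec_trin; infer_instance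

-- ===== CLAIM (what is proved, stated in full; the proofs are below) =====
def Claim_equal_trin : Prop := ∀ (grid : List (List Int)), Dom_trin grid → Pre_trin grid → Spec_trin grid (trin grid)

-- ===== LEMMAS AND PROOFS =====
def dig (v : Int) : Int := if v = -1 then 2 else if v = 1 then 1 else 0
theorem pyGet_cons3_one {α : Type} (x0 x1 x2 : α) (t : List α) :
    PySem.List.pyGet? (x0 :: x1 :: x2 :: t) (1 : Int) = some x1 := by
  have h : ((1 : Int)) = ((1 : Nat) : Int) := by simp
  rw [h, PySem.List.pyGet?_natCast]; rfl
theorem pyGet_cons3_two {α : Type} (x0 x1 x2 : α) (t : List α) :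
    PySem.List.pyGet? (x0 :: x1 :: x2 :: t) (2 : Int) = some x2 := by
  have h : ((2 : Int)) = ((2 : Nat) : Int) := by simp
  rw [h, PySem.List.pyGet?_natCast]; rfl
-- ===== VERDICT (by name: the statement is the Claim_ definition above) =====
theorem trin_spec : Claim_equal_trin := by
  intro grid _ hpre
  obtain ⟨hlen, hrows⟩ := hpre
  match grid, hlen with
  | (r0 :: r1 :: r2 :: rest), _ =>
    have h0 : 3 ≤ r0.length := hrows r0 (by simp [List.take])
    have h1 : 3 ≤ r1.length := hrows r1 (by simp [List.take])
    have h2 : 3 ≤ r2.length := hrows r2 (by simp [List.take])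
    match r0, h0 with
    | (a0 :: a1 :: a2 :: ta), _ =>
    match r1, h1 with
    | (b0 :: b1 :: b2 :: tb), _ =>
    match r2, h2 with
    | (c0 :: c1 :: c2 :: tc), _ =>
      show Spec_trin _ _
      have hA : trin ((a0 :: a1 :: a2 :: ta) :: (b0 :: b1 :: b2 :: tb) :: (c0 :: c1 :: c2 :: tc) :: rest)
          = dig a0 * 6561 + dig a1 * 2187 + dig a2 * 729 + dig b0 * 243 + dig b1 * 81
            + dig b2 * 27 + dig c0 * 9 + dig c1 * 3 + dig c2 := by
        simp [trin, dig, PySem.List.pyRange, List.range_succ,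
              pyGet_cons3_one, pyGet_cons3_two, List.foldl]
      have hB : trin_alt ((a0 :: a1 :: a2 :: ta) :: (b0 :: b1 :: b2 :: tb) :: (c0 :: c1 :: c2 :: tc) :: rest)
          = ((((((((dig a0) * 3 + dig a1) * 3 + dig a2) * 3 + dig b0) * 3 + dig b1) * 3 + dig b2) * 3 + dig c0) * 3 + dig c1) * 3 + dig c2 := by
        have hd : ∀ v : Int,
            ((PySem.Dict.getD (PySem.Dict.insert (PySem.Dict.insert PySem.Dict.empty (-1) '2') 1 '1') v '0').toNat : Int) - 48 = dig v := by
          intro v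
          unfold dig
          by_cases h1 : v = -1
          · subst h1; decide
          · by_cases h2 : v = 1
            · subst h2; decide
            · simp [PySem.Dict.getD, PySem.Dict.get?, PySem.Dict.insert, PySem.Dict.empty,
                    List.find?, h1, h2,
                    show ((-1:Int) == v) = false from beq_eq_false_iff_ne.mpr (Ne.symm h1),
                    show ((1:Int) == v) = false from beq_eq_false_iff_ne.mpr (Ne.symm h2)]
        simp [trin_alt, PySem.List.pyRange, List.range_succ,
              pyGet_cons3_one, pyGet_cons3_two, List.foldl, hd]
      unfold Spec_trin
      rw [hA, hB]
      ring
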